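-- pv_equiv track=rewrite | github.com/LDRMoliner/MAC_Labs_2023 | Lab08/Code For Students/prueba.py | eliminar_similares
-- ===== SOURCE A (Python) =====
-- def son_similares(clause1, clause2):
--     clause1_set_abs = set(map(abs, clause1))
--     clause2_set_abs = set(map(abs, clause2))
--
--     comunes_absoluto = clause1_set_abs.intersection(clause2_set_abs)
--
--     if sum(1 for num in clause1 if num > 0) == 3:
--         return len(comunes_absoluto) == 3 and sum(1 for num in clause2 if num < 0) == 2
--     if sum(1 for num in clause1 if num < 0) == 3:
--         return len(comunes_absoluto) == 3 and sum(1 for num in clause2 if num > 0) == 2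
--     # Check if there are at least two numbers with the same sign
--     return len(comunes_absoluto) == 3 and (sum(1 for num in clause1 if num > 0) == 2 or
--                                            sum(1 for num in clause1 if num < 0) == 2)
--
-- def eliminar_similares(clauses):
--     i = 0
--     j = 1
--     new_clauses = list(clauses)
--     while j < len(clauses):
--         if son_similares(clauses[i], clauses[j]):
--             new_clauses.remove(clauses[j])
--         j += 1
--         i += 1
--     return new_clauses
-- ===== SOURCE B (Python) =====
-- def son_similares(clause1, clause2):
--     # same predicate, computed once: sign counts of clause1 and the |.|-intersection size
--     pos = sum(1 for num in clause1 if num > 0)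
--     neg = sum(1 for num in clause1 if num < 0)
--     comunes = len({abs(n) for n in clause1} & {abs(n) for n in clause2})
--     if pos == 3:
--         return comunes == 3 and sum(1 for num in clause2 if num < 0) == 2
--     if neg == 3:
--         return comunes == 3 and sum(1 for num in clause2 if num > 0) == 2
--     return comunes == 3 and (pos == 2 or neg == 2)
-- def eliminar_similares(clauses):
--     # one pass over consecutive pairs: collect the values to delete
--     removals = [clauses[k + 1] for k in range(len(clauses) - 1)
--                 if son_similares(clauses[k], clauses[k + 1])]
--     # per-value removal quotas (tuple keys: clause lists are unhashable)
--     pending = {}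
--     for v in removals:
--         t = tuple(v)
--         pending[t] = pending.get(t, 0) + 1
--     # rebuild: skip the first pending[v] occurrences of each value
--     out = []
--     for x in clauses:
--         t = tuple(x)
--         if pending.get(t, 0) > 0:
--             pending[t] = pending.get(t, 0) - 1
--         else:
--             out.append(x)
--     return out
-- ===== Notes on version B (the rewrite author's own statement) =====
-- stated objective: alternative
-- what changed: A repeatedly calls list.remove (a fresh scan of the result list per similar pair); B collects the similar-successor values in one pass over consecutive pairs, condenses them into a per-value quota dict keyed by tuple(clause), and rebuilds the result in a single scan that skips the first quota[v] occurrences of each value v.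
import Mathlib
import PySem

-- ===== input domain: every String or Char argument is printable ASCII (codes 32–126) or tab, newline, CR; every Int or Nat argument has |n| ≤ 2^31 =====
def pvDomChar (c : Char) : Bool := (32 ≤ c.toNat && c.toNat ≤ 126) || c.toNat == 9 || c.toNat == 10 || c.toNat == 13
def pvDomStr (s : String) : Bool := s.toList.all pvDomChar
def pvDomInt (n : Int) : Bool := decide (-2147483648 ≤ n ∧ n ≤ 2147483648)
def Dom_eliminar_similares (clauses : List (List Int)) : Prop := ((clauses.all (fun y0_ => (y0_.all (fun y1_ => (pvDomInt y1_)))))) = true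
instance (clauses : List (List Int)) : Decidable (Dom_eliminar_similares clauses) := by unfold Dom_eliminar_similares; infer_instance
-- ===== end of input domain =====

-- B replaces A's repeated list.remove with one pass collecting removal values, a per-value
-- quota dictionary, and a single rebuild scan (objective: alternative decomposition).

-- ===== PORT A =====
-- A's son_similares
def similares (c1 c2 : List Int) : Bool :=
  let s1 := PySem.Set.ofList (c1.map (fun n => |n|))
  let s2 := PySem.Set.ofList (c2.map (fun n => |n|))
  let comunes := PySem.Set.inter s1 s2
  if c1.countP (fun n => decide (0 < n)) = 3 then
    comunes.length == 3 && c2.countP (fun n => decide (n < 0)) == 2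
  else if c1.countP (fun n => decide (n < 0)) = 3 then
    comunes.length == 3 && c2.countP (fun n => decide (0 < n)) == 2
  else
    comunes.length == 3 &&
      (c1.countP (fun n => decide (0 < n)) == 2 || c1.countP (fun n => decide (n < 0)) == 2)

-- A's while loop; list.remove never raises here (the value removed always comes from the
-- accumulator's origin list), so the total `.getD acc` branch of remove? is unreachable.
def elimA (clauses : List (List Int)) (i j : Nat) (acc : List (List Int)) : List (List Int) :=
  if _h : j < clauses.length then
    let acc' := if similares (clauses.getD i []) (clauses.getD j []) then
        (PySem.List.remove? acc (clauses.getD j [])).getD acc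
      else acc
    elimA clauses (i+1) (j+1) acc'
  else acc
termination_by clauses.length - j

def eliminar_similares (clauses : List (List Int)) : List (List Int) :=
  elimA clauses 0 1 clauses

-- ===== PORT B =====
-- B's son_similares (sign counts computed once, set-comprehension intersection)
def similaresB (c1 c2 : List Int) : Bool :=
  let pos := c1.countP (fun n => decide (0 < n))
  let neg := c1.countP (fun n => decide (n < 0))
  let comunes := (PySem.Set.inter (PySem.Set.ofList (c1.map (fun n => |n|)))
      (PySem.Set.ofList (c2.map (fun n => |n|)))).length
  if pos = 3 then comunes == 3 && c2.countP (fun n => decide (n < 0)) == 2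
  else if neg = 3 then comunes == 3 && c2.countP (fun n => decide (0 < n)) == 2
  else comunes == 3 && (pos == 2 || neg == 2)

-- the list comprehension over consecutive pairs
def elimB_removals (clauses : List (List Int)) : List (List Int) :=
  (PySem.List.pyRange 0 ((clauses.length : Int) - 1) 1).foldl
    (fun acc k =>
      if similaresB (PySem.List.pyGetD clauses k []) (PySem.List.pyGetD clauses (k+1) []) then
        acc ++ [PySem.List.pyGetD clauses (k+1) []]
      else acc) []

-- the quota dict (Python keys are tuple(v); a tuple of ints is List Int here)
def elimB_pending (rs : List (List Int)) : PySem.Dict (List Int) Int :=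
  rs.foldl (fun d v => d.insert v (d.getD v 0 + 1)) PySem.Dict.empty

def eliminar_similares_alt (clauses : List (List Int)) : List (List Int) :=
  let pending := elimB_pending (elimB_removals clauses)
  (clauses.foldl
    (fun (st : List (List Int) × PySem.Dict (List Int) Int) x =>
      if st.2.getD x 0 > 0 then (st.1, st.2.insert x (st.2.getD x 0 - 1))
      else (st.1 ++ [x], st.2))
    ([], pending)).1

-- ===== PRECONDITION & SPEC =====
def Spec_eliminar_similares (clauses : List (List Int)) (out : List (List Int)) : Prop := out = eliminar_similares_alt clauses
instance (clauses : List (List Int)) (out : List (List Int)) : Decidable (Spec_eliminar_similares clauses out) := by unfold Spec_eliminar_similares; infer_instance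

-- ===== CLAIM (what is proved, stated in full; the proofs are below) =====
def Claim_equal_eliminar_similares : Prop := ∀ (clauses : List (List Int)), Dom_eliminar_similares clauses → Spec_eliminar_similares clauses (eliminar_similares clauses)

-- ===== LEMMAS AND PROOFS =====

-- remove-first-occurrence as A's loop performs it (no-op when the value is absent)
def remF (acc : List (List Int)) (v : List Int) : List (List Int) :=
  (PySem.List.remove? acc v).getD acc

-- rebuild with a per-value quota function: skip the first (q v) occurrences of each v
def rebuildFn : List (List Int) → (List Int → Nat) → List (List Int)
  | [], _ => []
  | x :: xs, q =>
      if 0 < q x then rebuildFn xs (Function.update q x (q x - 1))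
      else x :: rebuildFn xs q

-- the similar-successor values from pair (j-1, j) onwards, in A's loop order
def simFrom (clauses : List (List Int)) (j : Nat) : List (List Int) :=
  if _h : j < clauses.length then
    (if similares (clauses.getD (j-1) []) (clauses.getD j []) then [clauses.getD j []] else [])
      ++ simFrom clauses (j+1)
  else []
termination_by clauses.length - j

lemma remF_nil (v : List Int) : remF [] v = [] := rfl

lemma remF_cons_self (x : List Int) (xs : List (List Int)) : remF (x :: xs) x = xs := by
  simp [remF]

lemma remF_cons_of_ne {x v : List Int} (xs : List (List Int)) (h : x ≠ v) :
    remF (x :: xs) v = x :: remF xs v := by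
  simp only [remF, PySem.List.remove?_cons_of_ne xs h]
  cases PySem.List.remove? xs v <;> simp

lemma rebuild_remF (r : List Int) :
    ∀ (xs : List (List Int)) (q : List Int → Nat),
      rebuildFn (remF xs r) q = rebuildFn xs (Function.update q r (q r + 1)) := by
  intro xs
  induction xs with
  | nil => intro q; simp [remF_nil, rebuildFn]
  | cons x xs ih =>
    intro q
    by_cases hx : x = r
    · subst hx
      rw [remF_cons_self]
      have h1 : (Function.update q x (q x + 1)) x = q x + 1 := by simp
      simp only [rebuildFn, h1]
      rw [if_pos (by omega)]
      have : Function.update (Function.update q x (q x + 1)) x (q x + 1 - 1) = q := by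
        funext v; by_cases hv : v = x <;> simp [Function.update, hv]
      rw [this]
    · rw [remF_cons_of_ne xs hx]
      have hqx : (Function.update q r (q r + 1)) x = q x := by
        simp [Function.update_of_ne hx]
      simp only [rebuildFn, hqx]
      by_cases hpos : 0 < q x
      · rw [if_pos hpos, if_pos hpos, ih]
        congr 1
        funext v
        by_cases hv : v = x <;> by_cases hv' : v = r <;>
          simp_all [Function.update]
      · rw [if_neg hpos, if_neg hpos, ih]

lemma rebuild_zero : ∀ xs : List (List Int), rebuildFn xs (fun _ => 0) = xs := by
  intro xs
  induction xs with
  | nil => rfl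
  | cons x xs ih => rw [rebuildFn, if_neg (by simp), ih]

lemma rebuild_congr : ∀ (xs : List (List Int)) (q q' : List Int → Nat),
    (∀ v, q v = q' v) → rebuildFn xs q = rebuildFn xs q' := by
  intro xs q q' h
  have : q = q' := funext h
  rw [this]

lemma foldl_remF (rs : List (List Int)) :
    ∀ xs : List (List Int), rs.foldl remF xs = rebuildFn xs (fun v => rs.count v) := by
  induction rs with
  | nil =>
    intro xs
    simp only [List.foldl_nil]
    rw [rebuild_congr xs _ (fun _ => 0) (by intro v; simp), rebuild_zero]
  | cons r rs ih =>
    intro xs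
    simp only [List.foldl_cons]
    rw [ih (remF xs r), rebuild_remF]
    apply rebuild_congr
    intro v
    by_cases hv : v = r
    · subst hv; simp
    · simp [Function.update_of_ne hv, Ne.symm hv]

lemma elimA_eq (clauses : List (List Int)) :
    ∀ (n i j : Nat) (acc : List (List Int)), clauses.length - j ≤ n → i + 1 = j →
      elimA clauses i j acc = (simFrom clauses j).foldl remF acc := by
  intro n
  induction n with
  | zero =>
    intro i j acc h hij
    rw [elimA, simFrom]
    rw [dif_neg (by omega), dif_neg (by omega)]
    rfl
  | succ n ihn =>
    intro i j acc h hij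
    rw [elimA, simFrom]
    by_cases hj : j < clauses.length
    · rw [dif_pos hj, dif_pos hj]
      have hi : j - 1 = i := by omega
      rw [hi, List.foldl_append]
      rw [ihn (i+1) (j+1) _ (by omega) (by omega)]
      congr 1
      split
      · rfl
      · rfl
    · rw [dif_neg hj, dif_neg hj]; rfl

lemma similaresB_eq : ∀ c1 c2, similaresB c1 c2 = similares c1 c2 := fun _ _ => rfl

lemma removals_eq (clauses : List (List Int)) :
    ∀ (n a : Nat) (acc : List (List Int)), clauses.length - (a+1) ≤ n →
      (PySem.List.pyRange (a : Int) ((clauses.length : Int) - 1) 1).foldl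
        (fun acc k =>
          if similares (PySem.List.pyGetD clauses k []) (PySem.List.pyGetD clauses (k+1) []) then
            acc ++ [PySem.List.pyGetD clauses (k+1) []]
          else acc) acc
      = acc ++ simFrom clauses (a+1) := by
  intro n
  induction n with
  | zero =>
    intro a acc h
    rw [PySem.List.pyRange_one_eq_nil (by omega), simFrom, dif_neg (by omega)]
    simp
  | succ n ihn =>
    intro a acc h
    by_cases ha : a + 1 < clauses.length
    · conv_rhs => rw [simFrom]
      rw [dif_pos ha]
      rw [PySem.List.pyRange_one_cons (by omega), List.foldl_cons]
      have hcast : ((a : Int) + 1) = ((a + 1 : Nat) : Int) := by push_cast; ring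
      rw [hcast]
      rw [ihn (a+1) _ (by omega)]
      simp only [PySem.List.pyGetD_natCast, Nat.add_sub_cancel]
      split
      · simp
      · simp
    · rw [PySem.List.pyRange_one_eq_nil (by omega), simFrom, dif_neg ha]
      simp

lemma pending_getD (rs : List (List Int)) (v : List Int) :
    (elimB_pending rs).getD v 0 = (rs.count v : Int) := by
  unfold elimB_pending
  rw [PySem.Dict.getD_foldl_insert_add_one]
  simp

lemma foldlB (xs : List (List Int)) :
    ∀ (d : PySem.Dict (List Int) Int) (q : List Int → Nat),
      (∀ v, d.getD v 0 = (q v : Int)) → ∀ out : List (List Int),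
      (xs.foldl
        (fun (st : List (List Int) × PySem.Dict (List Int) Int) x =>
          if st.2.getD x 0 > 0 then (st.1, st.2.insert x (st.2.getD x 0 - 1))
          else (st.1 ++ [x], st.2))
        (out, d)).1 = out ++ rebuildFn xs q := by
  induction xs with
  | nil => intro d q hq out; simp [rebuildFn]
  | cons x xs ih =>
    intro d q hq out
    simp only [List.foldl_cons, hq x]
    by_cases hpos : 0 < q x
    · rw [if_pos (by exact_mod_cast hpos)]
      rw [ih (d.insert x ((q x : Int) - 1)) (Function.update q x (q x - 1))
            (by
              intro v
              rw [PySem.Dict.getD_insert]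
              by_cases hv : v = x
              · subst hv; rw [if_pos rfl]; simp [Function.update]; omega
              · rw [if_neg hv, hq v, Function.update_of_ne hv])]
      rw [rebuildFn, if_pos hpos]
    · rw [if_neg (by exact_mod_cast hpos)]
      rw [ih d q hq (out ++ [x])]
      rw [rebuildFn, if_neg hpos]
      simp

-- ===== VERDICT (by name: the statement is the Claim_ definition above) =====
theorem eliminar_similares_spec : Claim_equal_eliminar_similares := by
  intro clauses _hdom
  unfold Spec_eliminar_similares
  have hA : eliminar_similares clauses
      = rebuildFn clauses (fun v => (simFrom clauses 1).count v) := by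
    unfold eliminar_similares
    rw [elimA_eq clauses clauses.length 0 1 clauses (by omega) rfl]
    exact foldl_remF (simFrom clauses 1) clauses
  have hrs : elimB_removals clauses = simFrom clauses 1 := by
    unfold elimB_removals
    simp only [similaresB_eq]
    have := removals_eq clauses clauses.length 0 [] (by omega)
    simpa using this
  have hB : eliminar_similares_alt clauses
      = rebuildFn clauses (fun v => (simFrom clauses 1).count v) := by
    unfold eliminar_similares_alt
    rw [foldlB clauses (elimB_pending (elimB_removals clauses))
          (fun v => (simFrom clauses 1).count v)
          (by intro v; rw [pending_getD, hrs]) []]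
    simp
  rw [hA, hB]
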